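-- pv_equiv track=rewrite | github.com/sunnysidesounds/InterviewQuestions | leetcode/find_all_anagrams_in_string.py | find_all_anagram_indexes
-- ===== SOURCE A (Python) =====
-- def find_all_anagram_indexes(s, p):
--
--     p_sorted = "".join(sorted(p))
--     results = []
--     for i in range(0, len(s) - len(p) + 1):
--         char_set = "".join(sorted(s[i:i+len(p)]))
--         if p_sorted == char_set:
--             results.append(i)
--
--     return results
-- ===== SOURCE B (Python) =====
-- def find_all_anagram_indexes(s, p):
--     # Sliding window (alternative single-pass algorithm): maintain per-char count
--     # difference (window - p) and the number of characters whose difference is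
--     # nonzero ("bad"); window is an anagram of p exactly when bad == 0.
--     m = len(p)
--     if m > len(s):
--         return []
--     diff = {}
--     bad = 0
--
--     def bump(c, delta):
--         nonlocal bad
--         old = diff.get(c, 0)
--         new = old + delta
--         diff[c] = new
--         if old == 0:
--             bad += 1
--         if new == 0:
--             bad -= 1
--
--     for c in p:
--         bump(c, -1)
--     for c in s[:m]:
--         bump(c, 1)
--     results = []
--     if bad == 0:
--         results.append(0)
--     i = 1
--     for out, inn in zip(s, s[m:]):
--         bump(out, -1)
--         bump(inn, 1)
--         if bad == 0:
--             results.append(i)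
--         i += 1
--     return results
-- ===== Notes on version B (the rewrite author's own statement) =====
-- stated objective: alternative
-- what changed: A sorts every length-m window of s and compares it with sorted(p); B makes one sliding-window pass keeping a per-character count difference (window minus p) in a dict plus a counter of characters whose difference is nonzero, appending an index exactly when that counter is zero.
import Mathlib
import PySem

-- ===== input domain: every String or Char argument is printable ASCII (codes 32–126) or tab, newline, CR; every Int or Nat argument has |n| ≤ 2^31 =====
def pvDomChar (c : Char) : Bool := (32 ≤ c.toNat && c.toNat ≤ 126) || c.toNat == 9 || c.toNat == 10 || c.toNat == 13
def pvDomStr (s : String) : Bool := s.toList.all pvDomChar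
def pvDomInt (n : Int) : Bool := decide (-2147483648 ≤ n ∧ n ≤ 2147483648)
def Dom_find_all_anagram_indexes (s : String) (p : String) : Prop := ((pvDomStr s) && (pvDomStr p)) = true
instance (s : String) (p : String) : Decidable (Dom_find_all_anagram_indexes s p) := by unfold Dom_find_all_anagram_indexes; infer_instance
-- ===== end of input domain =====

-- B replaces A's per-window sort-and-compare by a single sliding-window pass that
-- maintains a per-character count difference and a mismatch counter (objective: alternative).

-- ===== PORT A =====
-- Strings are handled through their character lists (PySem.Chars is exact there):
-- "".join(sorted(x)) is the string of x's characters in sorted order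
-- (PySem.List.sorted = Python's sorted; joining the 1-char strings back is String.ofList).
def find_all_anagram_indexes (s : String) (p : String) : List Int :=
  let p_sorted : String := String.ofList (PySem.List.sorted p.toList (fun c => c) false)
  (PySem.List.pyRange 0 (PySem.Str.len s - PySem.Str.len p + 1) 1).foldl
    (fun results i =>
      let char_set : String := String.ofList (PySem.List.sorted
        (PySem.List.slice s.toList (some i) (some (i + PySem.Str.len p))) (fun c => c) false)
      if p_sorted = char_set then results ++ [i] else results)
    []

-- ===== PORT B =====
-- bump(c, delta) of Source B: state is (diff dict, bad counter)
def pyBump (st : PySem.Dict Char Int × Int) (c : Char) (delta : Int) :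
    PySem.Dict Char Int × Int :=
  let old := st.1.getD c 0
  let nw := old + delta
  (st.1.insert c nw,
   st.2 + (if old == 0 then 1 else 0) - (if nw == 0 then 1 else 0))

def find_all_anagram_indexes_alt (s : String) (p : String) : List Int :=
  let m := PySem.Str.len p
  if m > PySem.Str.len s then []
  else
    -- for c in p: bump(c, -1)
    let st0 := p.toList.foldl (fun st c => pyBump st c (-1)) (PySem.Dict.empty, 0)
    -- for c in s[:m]: bump(c, 1)
    let st1 := (PySem.List.slice s.toList none (some m)).foldl (fun st c => pyBump st c 1) st0
    -- results = [0] if bad == 0 else []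
    let res0 : List Int := if st1.2 == 0 then [(0 : Int)] else []
    -- for out, inn in zip(s, s[m:]): bump(out,-1); bump(inn,1); append i if bad == 0; i += 1
    let fin := (s.toList.zip (PySem.List.slice s.toList (some m) none)).foldl
      (fun (acc : (PySem.Dict Char Int × Int) × List Int × Int) oi =>
        let st := pyBump (pyBump acc.1 oi.1 (-1)) oi.2 1
        (st, (if st.2 == 0 then acc.2.1 ++ [acc.2.2] else acc.2.1), acc.2.2 + 1))
      (st1, res0, 1)
    fin.2.1

-- ===== PRECONDITION & SPEC =====
def Spec_find_all_anagram_indexes (s : String) (p : String) (out : List Int) : Prop := out = find_all_anagram_indexes_alt s p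
instance (s : String) (p : String) (out : List Int) : Decidable (Spec_find_all_anagram_indexes s p out) := by unfold Spec_find_all_anagram_indexes; infer_instance

-- ===== CLAIM (what is proved, stated in full; the proofs are below) =====
def Claim_equal_find_all_anagram_indexes : Prop := ∀ (s : String) (p : String), Dom_find_all_anagram_indexes s p → Spec_find_all_anagram_indexes s p (find_all_anagram_indexes s p)

-- ===== LEMMAS AND PROOFS =====

-- invariant of B's (diff, bad) state: keys unique, bad = #{keys with nonzero value}
def DInv (st : PySem.Dict Char Int × Int) : Prop :=
  st.1.keys.Nodup ∧
  st.2 = ((st.1.keys.filter (fun k => !(st.1.getD k 0 == 0))).length : Int)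

lemma bump_fst_getD (st : PySem.Dict Char Int × Int) (c : Char) (δ : Int) (x : Char) :
    ((pyBump st c δ).1).getD x 0 = if x = c then st.1.getD c 0 + δ else st.1.getD x 0 := by
  simp [pyBump, PySem.Dict.getD_insert]

lemma filter_update (l : List Char) (hnd : l.Nodup) (c : Char) (hc : c ∈ l)
    (p q : Char → Bool) (hagree : ∀ x ∈ l, x ≠ c → p x = q x) :
    ((l.filter q).length : Int)
      = (l.filter p).length - (if p c then 1 else 0) + (if q c then 1 else 0) := by
  induction l with
  | nil => cases hc
  | cons a t ih =>
      have hnd' := hnd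
      rw [List.nodup_cons] at hnd'
      by_cases hac : a = c
      · subst hac
        have hfil : t.filter p = t.filter q := by
          apply List.filter_congr
          intro x hx
          exact hagree x (List.mem_cons_of_mem _ hx) (fun hxa => hnd'.1 (hxa ▸ hx))
        rw [List.filter_cons, List.filter_cons, hfil]
        by_cases hp : p a = true <;> by_cases hq : q a = true <;>
          simp [hp, hq] <;> push_cast <;> ring
      · have hct : c ∈ t := (List.mem_cons.mp hc).resolve_left (fun h => hac h.symm)
        have hpa : p a = q a := hagree a List.mem_cons_self hac
        have := ih hnd'.2 hct (fun x hx hxc => hagree x (List.mem_cons_of_mem _ hx) hxc)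
        rw [List.filter_cons, List.filter_cons, ← hpa]
        by_cases hp : p a = true <;> simp [hp, this] <;> push_cast <;> ring

lemma bump_inv (st : PySem.Dict Char Int × Int) (c : Char) (δ : Int)
    (h : DInv st) : DInv (pyBump st c δ) := by
  obtain ⟨hnd, hbad⟩ := h
  constructor
  · exact PySem.Dict.nodup_keys_insert _ _ _ hnd
  · show st.2 + _ - _ = _
    by_cases hcont : st.1.contains c = true
    · have hkeys : ((pyBump st c δ).1).keys = st.1.keys := by
        simp only [pyBump]
        exact PySem.Dict.keys_insert_of_contains _ _ hcont
      have hcm : c ∈ st.1.keys := (PySem.Dict.contains_iff_mem_keys _ _).mp hcont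
      rw [hkeys]
      rw [filter_update st.1.keys hnd c hcm
            (fun k => !(st.1.getD k 0 == 0))
            (fun k => !(((pyBump st c δ).1).getD k 0 == 0))
            (fun x _ hxc => by simp [bump_fst_getD, hxc])]
      rw [← hbad, bump_fst_getD, if_pos rfl]
      by_cases h1 : st.1.getD c 0 = 0 <;> by_cases h2 : st.1.getD c 0 + δ = 0 <;>
        simp [h1, h2] <;> omega
    · have hc0 : st.1.getD c 0 = 0 :=
        PySem.Dict.getD_of_not_contains _ _ (by simpa using hcont)
      have hkeys : ((pyBump st c δ).1).keys = st.1.keys ++ [c] := by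
        simp only [pyBump]
        exact PySem.Dict.keys_insert_of_not_contains _ _ (by simpa using hcont)
      have hcnm : c ∉ st.1.keys := fun hm =>
        hcont ((PySem.Dict.contains_iff_mem_keys _ _).mpr hm)
      have hfil : st.1.keys.filter (fun k => !(((pyBump st c δ).1).getD k 0 == 0))
          = st.1.keys.filter (fun k => !(st.1.getD k 0 == 0)) := by
        apply List.filter_congr
        intro x hx
        have hxc : x ≠ c := fun h => hcnm (h ▸ hx)
        simp [bump_fst_getD, hxc]
      rw [hkeys, List.filter_append, List.length_append, hfil, hbad]
      have hc' : ((pyBump st c δ).1).getD c 0 = δ := by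
        rw [bump_fst_getD, if_pos rfl, hc0, zero_add]
      by_cases h2 : δ = 0
      · subst h2; simp [List.filter_cons, hc', hc0]
      · simp [List.filter_cons, hc', hc0, h2]

lemma bad_zero_iff (st : PySem.Dict Char Int × Int) (h : DInv st) :
    st.2 = 0 ↔ ∀ x, st.1.getD x 0 = 0 := by
  obtain ⟨hnd, hbad⟩ := h
  rw [hbad]
  constructor
  · intro h0 x
    have hnil : st.1.keys.filter (fun k => !(st.1.getD k 0 == 0)) = [] := by
      have : (st.1.keys.filter (fun k => !(st.1.getD k 0 == 0))).length = 0 := by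
        exact_mod_cast h0
      exact List.length_eq_zero_iff.mp this
    by_cases hx : x ∈ st.1.keys
    · have := List.filter_eq_nil_iff.mp hnil x hx
      simpa using this
    · exact PySem.Dict.getD_of_not_contains _ _
        (by
          by_contra hcc
          exact hx ((PySem.Dict.contains_iff_mem_keys _ _).mp (by simpa using hcc)))
  · intro hall
    have : st.1.keys.filter (fun k => !(st.1.getD k 0 == 0)) = [] :=
      List.filter_eq_nil_iff.mpr (fun x _ => by simp [hall x])
    simp [this]

lemma foldl_bump_inv (l : List Char) (δ : Int) (st : PySem.Dict Char Int × Int)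
    (h : DInv st) : DInv (l.foldl (fun st c => pyBump st c δ) st) := by
  induction l generalizing st with
  | nil => exact h
  | cons a t ih => exact ih _ (bump_inv _ _ _ h)

lemma foldl_bump_getD (l : List Char) (δ : Int) (st : PySem.Dict Char Int × Int) (x : Char) :
    ((l.foldl (fun st c => pyBump st c δ) st).1).getD x 0
      = st.1.getD x 0 + δ * (l.count x : Int) := by
  induction l generalizing st with
  | nil => simp only [List.foldl_nil, List.count_nil, Nat.cast_zero, mul_zero, add_zero]
  | cons a t ih =>
      rw [List.foldl_cons, ih, bump_fst_getD, List.count_cons]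
      by_cases hx : x = a
      · subst hx; simp only [if_pos rfl, beq_self_eq_true, if_true]; push_cast; ring
      · rw [if_neg hx, beq_eq_false_iff_ne.mpr (Ne.symm hx), if_neg Bool.false_ne_true]
        push_cast; ring

-- B's test "bad == 0" is A's test "sorted(p) == sorted(window)"
lemma cond_iff (ps w : List Char) (st : PySem.Dict Char Int × Int) (hI : DInv st)
    (hg : ∀ x, st.1.getD x 0 = (w.count x : Int) - (ps.count x : Int)) :
    ((st.2 == 0) = true)
      ↔ String.ofList (PySem.List.sorted ps (fun c => c) false)
          = String.ofList (PySem.List.sorted w (fun c => c) false) := by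
  rw [beq_iff_eq, bad_zero_iff st hI, String.ofList_inj,
      PySem.List.sorted_id_eq_sorted_id_iff_perm, List.perm_iff_count]
  constructor
  · intro h a
    have := h a
    rw [hg a, sub_eq_zero] at this
    exact_mod_cast this.symm
  · intro h x
    rw [hg x, sub_eq_zero]
    exact_mod_cast (h x).symm

-- sliding the window one step to the right: counts change by the outgoing/incoming char
lemma window_step (cs : List Char) (m k : Nat) (h : k + m < cs.length) (x : Char) :
    ((cs.drop (k + 1)).take m).count x + (if cs[k] = x then 1 else 0)
      = ((cs.drop k).take m).count x + (if cs[k + m]'(by omega) = x then 1 else 0) := by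
  have h1 : (cs.drop k).take (m + 1) = cs[k] :: (cs.drop (k + 1)).take m := by
    rw [List.drop_eq_getElem_cons (by omega : k < cs.length), List.take_succ_cons]
  have hm : m < (cs.drop k).length := by rw [List.length_drop]; omega
  have h2 : (cs.drop k).take (m + 1) = (cs.drop k).take m ++ [cs[k + m]'(by omega)] := by
    rw [← List.take_concat_get hm, List.concat_eq_append, List.getElem_drop]
  have hcnt := congrArg (List.count x) (h1.symm.trans h2)
  by_cases e1 : cs[k] = x <;> by_cases e2 : cs[k + m]'(by omega) = x <;>
    simp [e1, e2, List.count_cons, List.count_append] at hcnt ⊢ <;> omega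

-- the main loop of B computes the same appends as A's loop over range(k+1, n-m+1)
lemma loop_eq (cs ps : List Char) :
    ∀ (j k : Nat) (st : PySem.Dict Char Int × Int) (res : List Int),
    ps.length + k ≤ cs.length → j = cs.length - ps.length - k → DInv st →
    (∀ x, st.1.getD x 0 = (((cs.drop k).take ps.length).count x : Int) - (ps.count x : Int)) →
    (((cs.drop k).zip (cs.drop (k + ps.length))).foldl
        (fun (acc : (PySem.Dict Char Int × Int) × List Int × Int) oi =>
          let st := pyBump (pyBump acc.1 oi.1 (-1)) oi.2 1
          (st, (if st.2 == 0 then acc.2.1 ++ [acc.2.2] else acc.2.1), acc.2.2 + 1))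
        (st, res, ((k : Int) + 1))).2.1
      = (PySem.List.pyRange ((k : Int) + 1) ((cs.length : Int) - (ps.length : Int) + 1) 1).foldl
          (fun results i =>
            if String.ofList (PySem.List.sorted ps (fun c => c) false)
               = String.ofList (PySem.List.sorted
                   (PySem.List.slice cs (some i) (some (i + (ps.length : Int)))) (fun c => c) false)
            then results ++ [i] else results) res := by
  intro j
  induction j with
  | zero =>
      intro k st res hkm hj hI hg
      have hk : k + ps.length = cs.length := by omega
      rw [hk, List.drop_length, List.zip_nil_right, List.foldl_nil,
          PySem.List.pyRange_one_eq_nil (by omega), List.foldl_nil]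
  | succ j ih =>
      intro k st res hkm hj hI hg
      have hkn : k < cs.length := by omega
      have hkmn : k + ps.length < cs.length := by omega
      rw [List.drop_eq_getElem_cons hkn, List.drop_eq_getElem_cons hkmn,
          List.zip_cons_cons, List.foldl_cons]
      set st' := pyBump (pyBump st cs[k] (-1)) (cs[k + ps.length]'hkmn) 1 with hst'
      have hI' : DInv st' := bump_inv _ _ _ (bump_inv _ _ _ hI)
      have hform : ∀ x, st'.1.getD x 0
          = st.1.getD x 0 - (if cs[k] = x then 1 else 0)
            + (if cs[k + ps.length]'hkmn = x then 1 else 0) := by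
        intro x
        rw [hst', bump_fst_getD]
        by_cases e2 : x = cs[k + ps.length]'hkmn
        · rw [if_pos e2, bump_fst_getD]
          by_cases e3 : cs[k + ps.length]'hkmn = cs[k]
          · have exk : cs[k] = x := (e2.trans e3).symm
            rw [if_pos e3, if_pos exk, if_pos e2.symm, ← exk]
            ring
          · rw [if_neg e3, if_neg (fun h => e3 (h.trans e2).symm), if_pos e2.symm, e2]
            ring
        · rw [if_neg e2, bump_fst_getD]
          by_cases e1 : x = cs[k]
          · rw [if_pos e1, if_pos e1.symm, if_neg (fun h => e2 h.symm), e1]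
            ring
          · rw [if_neg e1, if_neg (fun h => e1 h.symm), if_neg (fun h => e2 h.symm)]
            ring
      have hg' : ∀ x, st'.1.getD x 0
          = (((cs.drop (k + 1)).take ps.length).count x : Int) - (ps.count x : Int) := by
        intro x
        have hw := window_step cs ps.length k hkmn x
        rw [hform x, hg x]
        by_cases e1 : cs[k] = x <;> by_cases e2 : cs[k + ps.length]'hkmn = x <;>
          simp only [e1, e2, if_pos, if_neg, if_true, if_false] at hw ⊢ <;>
          simp [e1, e2] at hw ⊢ <;> omega
      have hlt : (k : Int) + 1 < (cs.length : Int) - (ps.length : Int) + 1 := by omega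
      rw [PySem.List.pyRange_one_cons hlt, List.foldl_cons]
      have hsl : PySem.List.slice cs (some ((k : Int) + 1)) (some (((k : Int) + 1) + (ps.length : Int)))
          = (cs.drop (k + 1)).take ps.length := by
        have h := PySem.List.slice_natCast_add cs (k + 1) ps.length
        push_cast at h
        exact h
      rw [hsl]
      have hcond := cond_iff ps ((cs.drop (k + 1)).take ps.length) st' hI' hg'
      have hres : (if st'.2 == 0 then res ++ [(k : Int) + 1] else res)
          = (if String.ofList (PySem.List.sorted ps (fun c => c) false)
               = String.ofList (PySem.List.sorted ((cs.drop (k + 1)).take ps.length) (fun c => c) false)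
             then res ++ [(k : Int) + 1] else res) := by
        by_cases hc : (st'.2 == 0) = true
        · rw [if_pos hc, if_pos (hcond.mp hc)]
        · rw [if_neg hc, if_neg (fun h => hc (hcond.mpr h))]
      simp only [hres]
      have harith : k + ps.length + 1 = (k + 1) + ps.length := by omega
      rw [harith]
      have hi : ((k : Int) + 1) + 1 = ((k + 1 : Nat) : Int) + 1 := by push_cast; ring
      rw [hi]
      exact ih (k + 1) st' _ (by omega) (by omega) hI' hg'

-- ===== VERDICT (by name: the statement is the Claim_ definition above) =====
theorem find_all_anagram_indexes_spec : Claim_equal_find_all_anagram_indexes := by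
  intro s p _
  show find_all_anagram_indexes s p = find_all_anagram_indexes_alt s p
  simp only [find_all_anagram_indexes, find_all_anagram_indexes_alt, PySem.Str.len_eq]
  by_cases hmn : ((p.toList.length : Int) > (s.toList.length : Int))
  · rw [if_pos hmn, PySem.List.pyRange_one_eq_nil (by omega), List.foldl_nil]
  · rw [if_neg hmn]
    have hmle : p.toList.length ≤ s.toList.length := by omega
    -- the state after the two initial bump loops
    have hI0 : DInv ((PySem.Dict.empty : PySem.Dict Char Int), (0 : Int)) := by
      constructor
      · rw [PySem.Dict.keys_empty]; exact List.nodup_nil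
      · rw [PySem.Dict.keys_empty]; simp
    have hI1 : DInv (p.toList.foldl (fun st c => pyBump st c (-1)) (PySem.Dict.empty, 0)) :=
      foldl_bump_inv _ _ _ hI0
    simp only [PySem.List.slice_to_natCast, PySem.List.slice_from_natCast]
    have hI2 : DInv ((s.toList.take p.toList.length).foldl (fun st c => pyBump st c 1)
        (p.toList.foldl (fun st c => pyBump st c (-1)) (PySem.Dict.empty, 0))) :=
      foldl_bump_inv _ _ _ hI1
    have hg2 : ∀ x, (((s.toList.take p.toList.length).foldl (fun st c => pyBump st c 1)
        (p.toList.foldl (fun st c => pyBump st c (-1)) (PySem.Dict.empty, 0))).1).getD x 0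
        = (((s.toList.drop 0).take p.toList.length).count x : Int) - (p.toList.count x : Int) := by
      intro x
      rw [foldl_bump_getD, foldl_bump_getD, PySem.Dict.getD_empty, List.drop_zero]
      ring
    -- peel index 0 from A's range
    rw [PySem.List.pyRange_one_cons (show (0 : Int) < (s.toList.length : Int) - (p.toList.length : Int) + 1 by omega),
        List.foldl_cons]
    have hsl0 : PySem.List.slice s.toList (some (0 : Int)) (some ((0 : Int) + (p.toList.length : Int)))
        = (s.toList.drop 0).take p.toList.length := by
      have h := PySem.List.slice_natCast_add s.toList 0 p.toList.length
      push_cast at h ⊢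
      exact h
    simp only [hsl0]
    have hcond := cond_iff p.toList ((s.toList.drop 0).take p.toList.length) _ hI2 hg2
    have hres : (if ((s.toList.take p.toList.length).foldl (fun st c => pyBump st c 1)
          (p.toList.foldl (fun st c => pyBump st c (-1)) (PySem.Dict.empty, 0))).2 == 0
          then [(0 : Int)] else [])
        = (if String.ofList (PySem.List.sorted p.toList (fun c => c) false)
             = String.ofList (PySem.List.sorted ((s.toList.drop 0).take p.toList.length) (fun c => c) false)
           then ([] : List Int) ++ [0] else []) := by
      by_cases hc : (((s.toList.take p.toList.length).foldl (fun st c => pyBump st c 1)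
          (p.toList.foldl (fun st c => pyBump st c (-1)) (PySem.Dict.empty, 0))).2 == 0) = true
      · rw [if_pos hc, if_pos (hcond.mp hc)]; rfl
      · rw [if_neg hc, if_neg (fun h => hc (hcond.mpr h))]
    simp only [hres]
    have main := loop_eq s.toList p.toList (s.toList.length - p.toList.length) 0 _
      (if String.ofList (PySem.List.sorted p.toList (fun c => c) false)
             = String.ofList (PySem.List.sorted ((s.toList.drop 0).take p.toList.length) (fun c => c) false)
           then ([] : List Int) ++ [0] else [])
      (by omega) (by omega) hI2 hg2
    simp only [Nat.cast_zero, zero_add, List.drop_zero, Nat.zero_add] at main ⊢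
    exact main.symm
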